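-- pv_equiv track=rewrite | github.com/jackreichelt/aoc2020 | day17/day17b.py | cubesToCheck
-- ===== SOURCE A (Python) =====
-- def cubesToCheck(cubes):
--   minX = 0
--   maxX = 0
--   minY = 0
--   maxY = 0
--   minZ = 0
--   maxZ = 0
--   minW = 0
--   maxW = 0
--
--   for x, y, z, w in cubes.keys():
--     if x < minX:
--       minX = x
--     elif x > maxX:
--       maxX = x
--
--     if y < minY:
--       minY = y
--     elif y > maxY:
--       maxY = y
--
--     if z < minZ:
--       minZ = z
--     elif z > maxZ:
--       maxZ = z
--
--     if w < minW:
--       minW = w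
--     elif w > maxW:
--       maxW = w
--
--   return minX-1, maxX+1, minY-1, maxY+1, minZ-1, maxZ+1, minW-1, maxW+1
-- ===== SOURCE B (Python) =====
-- def cubesToCheck(cubes):
--   keys = list(cubes.keys())
--   out = []
--   for i in range(4):
--     vs = [0] + [k[i] for k in keys]
--     out.append(min(vs) - 1)
--     out.append(max(vs) + 1)
--   return tuple(out)
-- ===== Notes on version B (the rewrite author's own statement) =====
-- stated objective: idiomatic
-- what changed: Replaces the manual 8-variable if/elif min-max tracking loop with per-dimension lists seeded with 0 and the builtin min/max, then widens each extent by 1.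
import Mathlib
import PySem

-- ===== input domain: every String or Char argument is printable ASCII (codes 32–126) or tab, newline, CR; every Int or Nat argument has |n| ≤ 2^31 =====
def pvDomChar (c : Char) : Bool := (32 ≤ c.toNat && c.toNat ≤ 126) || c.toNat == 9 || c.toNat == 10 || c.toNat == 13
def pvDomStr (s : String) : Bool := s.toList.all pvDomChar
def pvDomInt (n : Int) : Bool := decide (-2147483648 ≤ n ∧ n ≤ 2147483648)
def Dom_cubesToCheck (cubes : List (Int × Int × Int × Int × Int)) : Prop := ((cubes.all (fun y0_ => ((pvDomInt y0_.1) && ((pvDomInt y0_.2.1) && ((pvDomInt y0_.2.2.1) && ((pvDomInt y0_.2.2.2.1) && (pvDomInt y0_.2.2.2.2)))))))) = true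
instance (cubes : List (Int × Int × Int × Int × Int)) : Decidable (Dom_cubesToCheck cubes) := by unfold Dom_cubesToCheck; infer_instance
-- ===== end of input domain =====

-- B replaces A's manual 8-variable if/elif min/max tracking loop with per-dimension
-- coordinate lists seeded with 0 and the builtin min/max (idiomatic decomposition).


-- ===== PORT A =====
-- one loop iteration of A: the four independent if/elif min/max updates
def stepA (s : Int × Int × Int × Int × Int × Int × Int × Int)
    (c : Int × Int × Int × Int × Int) : Int × Int × Int × Int × Int × Int × Int × Int :=
  match s, c with
  | (minX, maxX, minY, maxY, minZ, maxZ, minW, maxW), (x, y, z, w, _) =>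
    let (minX, maxX) := if x < minX then (x, maxX) else if x > maxX then (minX, x) else (minX, maxX)
    let (minY, maxY) := if y < minY then (y, maxY) else if y > maxY then (minY, y) else (minY, maxY)
    let (minZ, maxZ) := if z < minZ then (z, maxZ) else if z > maxZ then (minZ, z) else (minZ, maxZ)
    let (minW, maxW) := if w < minW then (w, maxW) else if w > maxW then (minW, w) else (minW, maxW)
    (minX, maxX, minY, maxY, minZ, maxZ, minW, maxW)

def cubesToCheck (cubes : List (Int × Int × Int × Int × Int)) : Int × Int × Int × Int × Int × Int × Int × Int :=
  match cubes.foldl stepA (0, 0, 0, 0, 0, 0, 0, 0) with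
  | (minX, maxX, minY, maxY, minZ, maxZ, minW, maxW) =>
    (minX - 1, maxX + 1, minY - 1, maxY + 1, minZ - 1, maxZ + 1, minW - 1, maxW + 1)

-- ===== PORT B =====
-- extent of one dimension: vs = [0] + [k[i] for k in keys]; (min(vs)-1, max(vs)+1)
def extentB (cubes : List (Int × Int × Int × Int × Int)) (proj : Int × Int × Int × Int × Int → Int) : Int × Int :=
  let vs : List Int := 0 :: cubes.map proj
  ((PySem.List.min? vs (fun y => y)).getD 0 - 1, (PySem.List.max? vs (fun y => y)).getD 0 + 1)

def cubesToCheck_alt (cubes : List (Int × Int × Int × Int × Int)) : Int × Int × Int × Int × Int × Int × Int × Int :=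
  match extentB cubes (·.1), extentB cubes (·.2.1), extentB cubes (·.2.2.1), extentB cubes (·.2.2.2.1) with
  | (a, b), (c, d), (e, f), (g, h) => (a, b, c, d, e, f, g, h)

-- ===== PRECONDITION & SPEC =====
def Spec_cubesToCheck (cubes : List (Int × Int × Int × Int × Int)) (out : Int × Int × Int × Int × Int × Int × Int × Int) : Prop := out = cubesToCheck_alt cubes
-- instance search gives up on the 8-fold product, so the DecidableEq chain is built explicitly
instance (cubes : List (Int × Int × Int × Int × Int)) (out : Int × Int × Int × Int × Int × Int × Int × Int) : Decidable (Spec_cubesToCheck cubes out) := by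
  unfold Spec_cubesToCheck
  have d1 : DecidableEq Int := inferInstance
  have d2 : DecidableEq (Int × Int) := @instDecidableEqProd _ _ d1 d1
  have d3 : DecidableEq (Int × Int × Int) := @instDecidableEqProd _ _ d1 d2
  have d4 : DecidableEq (Int × Int × Int × Int) := @instDecidableEqProd _ _ d1 d3
  have d5 : DecidableEq (Int × Int × Int × Int × Int) := @instDecidableEqProd _ _ d1 d4
  have d6 : DecidableEq (Int × Int × Int × Int × Int × Int) := @instDecidableEqProd _ _ d1 d5
  have d7 : DecidableEq (Int × Int × Int × Int × Int × Int × Int) := @instDecidableEqProd _ _ d1 d6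
  have d8 : DecidableEq (Int × Int × Int × Int × Int × Int × Int × Int) := @instDecidableEqProd _ _ d1 d7
  exact d8 _ _

-- ===== CLAIM (what is proved, stated in full; the proofs are below) =====
def Claim_equal_cubesToCheck : Prop := ∀ (cubes : List (Int × Int × Int × Int × Int)), Dom_cubesToCheck cubes → Spec_cubesToCheck cubes (cubesToCheck cubes)

-- ===== LEMMAS AND PROOFS =====

-- A's if/elif update is exactly (min, max) whenever the running min ≤ running max
lemma upd_eq (m M v : Int) (h : m ≤ M) :
    (if v < m then (v, M) else if v > M then (m, v) else (m, M)) = (min m v, max M v) := by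
  split_ifs <;> simp_all <;> omega

-- A's fold computes the running min/max of each projection
lemma foldA (l : List (Int × Int × Int × Int × Int))
    (mx Mx my My mz Mz mw Mw : Int)
    (hx : mx ≤ Mx) (hy : my ≤ My) (hz : mz ≤ Mz) (hw : mw ≤ Mw) :
    l.foldl stepA (mx, Mx, my, My, mz, Mz, mw, Mw) =
      ((l.map (·.1)).foldl min mx, (l.map (·.1)).foldl max Mx,
       (l.map (·.2.1)).foldl min my, (l.map (·.2.1)).foldl max My,
       (l.map (·.2.2.1)).foldl min mz, (l.map (·.2.2.1)).foldl max Mz,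
       (l.map (·.2.2.2.1)).foldl min mw, (l.map (·.2.2.2.1)).foldl max Mw) := by
  induction l generalizing mx Mx my My mz Mz mw Mw with
  | nil => simp
  | cons c t ih =>
    obtain ⟨x, y, z, w, v⟩ := c
    simp only [List.foldl_cons, List.map_cons, stepA,
      upd_eq _ _ _ hx, upd_eq _ _ _ hy, upd_eq _ _ _ hz, upd_eq _ _ _ hw]
    exact ih _ _ _ _ _ _ _ _ (le_trans (min_le_left _ _) (le_trans hx (le_max_left _ _)))
      (le_trans (min_le_left _ _) (le_trans hy (le_max_left _ _)))
      (le_trans (min_le_left _ _) (le_trans hz (le_max_left _ _)))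
      (le_trans (min_le_left _ _) (le_trans hw (le_max_left _ _)))

lemma extentB_eq (cubes : List (Int × Int × Int × Int × Int)) (proj : Int × Int × Int × Int × Int → Int) :
    extentB cubes proj = ((cubes.map proj).foldl min 0 - 1, (cubes.map proj).foldl max 0 + 1) := by
  simp [extentB, PySem.List.min?_id_cons, PySem.List.max?_id_cons]

-- ===== VERDICT (by name: the statement is the Claim_ definition above) =====
theorem cubesToCheck_spec : Claim_equal_cubesToCheck := by
  intro cubes _
  unfold Spec_cubesToCheck cubesToCheck cubesToCheck_alt
  rw [foldA cubes 0 0 0 0 0 0 0 0 le_rfl le_rfl le_rfl le_rfl]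
  simp [extentB_eq]
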